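-- pv_equiv track=rewrite | github.com/kishanparihar2303-byte/K | time_helper.py | detect_tz_from_phone
-- ===== SOURCE A (Python) =====
-- PHONE_TZ_MAP = {
--     "91":  "Asia/Kolkata",       # India
--     "92":  "Asia/Karachi",       # Pakistan
--     "880": "Asia/Dhaka",         # Bangladesh
--     "977": "Asia/Kathmandu",     # Nepal
--     "94":  "Asia/Colombo",       # Sri Lanka
--     "971": "Asia/Dubai",         # UAE
--     "966": "Asia/Riyadh",        # Saudi Arabia
--     "968": "Asia/Muscat",        # Oman
--     "974": "Asia/Qatar",         # Qatar
--     "965": "Asia/Kuwait",        # Kuwait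
--     "973": "Asia/Bahrain",       # Bahrain
--     "65":  "Asia/Singapore",     # Singapore
--     "60":  "Asia/Kuala_Lumpur",  # Malaysia
--     "66":  "Asia/Bangkok",       # Thailand
--     "62":  "Asia/Jakarta",       # Indonesia
--     "63":  "Asia/Manila",        # Philippines
--     "84":  "Asia/Ho_Chi_Minh",   # Vietnam
--     "86":  "Asia/Shanghai",      # China
--     "81":  "Asia/Tokyo",         # Japan
--     "82":  "Asia/Seoul",         # South Korea
--     "44":  "Europe/London",      # UK
--     "49":  "Europe/Berlin",      # Germany
--     "33":  "Europe/Paris",       # France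
--     "7":   "Europe/Moscow",      # Russia
--     "1":   "America/New_York",   # USA/Canada — Eastern default. West Coast: America/Los_Angeles
--     "61":  "Australia/Sydney",   # Australia
--     "64":  "Pacific/Auckland",   # New Zealand
--     "27":  "Africa/Johannesburg",# South Africa
--     "234": "Africa/Lagos",       # Nigeria
--     "254": "Africa/Nairobi",     # Kenya
--     "20":  "Africa/Cairo",       # Egypt
--     "55":  "America/Sao_Paulo",  # Brazil
--     "52":  "America/Mexico_City",# Mexico
--     "54":  "America/Argentina/Buenos_Aires",  # Argentina
-- }
--
-- def detect_tz_from_phone(phone: str) -> str | None: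
--     """
--     Phone number se timezone detect karo.
--     Returns IANA timezone string ya None.
--
--     '+91XXXXXXXXXX' → 'Asia/Kolkata'
--     '+14155552671'  → 'America/New_York'
--     """
--     if not phone:
--         return None
--     # Strip + and spaces
--     digits = phone.lstrip("+").replace(" ", "").replace("-", "")
--
--     # Try longest prefix first (3 digits), then 2, then 1
--     for length in (3, 2, 1):
--         prefix = digits[:length]
--         if prefix in PHONE_TZ_MAP:
--             return PHONE_TZ_MAP[prefix]
--     return None
-- ===== SOURCE B (Python) =====
-- PHONE_TZ_MAP = {
--     "91":  "Asia/Kolkata",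
--     "92":  "Asia/Karachi",
--     "880": "Asia/Dhaka",
--     "977": "Asia/Kathmandu",
--     "94":  "Asia/Colombo",
--     "971": "Asia/Dubai",
--     "966": "Asia/Riyadh",
--     "968": "Asia/Muscat",
--     "974": "Asia/Qatar",
--     "965": "Asia/Kuwait",
--     "973": "Asia/Bahrain",
--     "65":  "Asia/Singapore",
--     "60":  "Asia/Kuala_Lumpur",
--     "66":  "Asia/Bangkok",
--     "62":  "Asia/Jakarta",
--     "63":  "Asia/Manila",
--     "84":  "Asia/Ho_Chi_Minh",
--     "86":  "Asia/Shanghai",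
--     "81":  "Asia/Tokyo",
--     "82":  "Asia/Seoul",
--     "44":  "Europe/London",
--     "49":  "Europe/Berlin",
--     "33":  "Europe/Paris",
--     "7":   "Europe/Moscow",
--     "1":   "America/New_York",
--     "61":  "Australia/Sydney",
--     "64":  "Pacific/Auckland",
--     "27":  "Africa/Johannesburg",
--     "234": "Africa/Lagos",
--     "254": "Africa/Nairobi",
--     "20":  "Africa/Cairo",
--     "55":  "America/Sao_Paulo",
--     "52":  "America/Mexico_City",
--     "54":  "America/Argentina/Buenos_Aires",
-- }
--
-- def detect_tz_from_phone(phone: str) -> str | None: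
--     if not phone:
--         return None
--     # normalize: skip leading '+', drop spaces and dashes in one character pass
--     i = 0
--     while i < len(phone) and phone[i] == '+':
--         i += 1
--     digits = ''.join(c for c in phone[i:] if c != ' ' and c != '-')
--     # single pass over the table keeping the longest matching prefix
--     best = None
--     for key, tz in PHONE_TZ_MAP.items():
--         if digits.startswith(key) and (best is None or len(key) > len(best[0])):
--             best = (key, tz)
--     return None if best is None else best[1]
-- ===== Notes on version B (the rewrite author's own statement) =====
-- stated objective: alternative
-- what changed: Replaces the three sliced-prefix dict lookups with a single longest-match fold over the table's items, and the chained replace() normalization with one character-filter pass.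
import Mathlib
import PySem

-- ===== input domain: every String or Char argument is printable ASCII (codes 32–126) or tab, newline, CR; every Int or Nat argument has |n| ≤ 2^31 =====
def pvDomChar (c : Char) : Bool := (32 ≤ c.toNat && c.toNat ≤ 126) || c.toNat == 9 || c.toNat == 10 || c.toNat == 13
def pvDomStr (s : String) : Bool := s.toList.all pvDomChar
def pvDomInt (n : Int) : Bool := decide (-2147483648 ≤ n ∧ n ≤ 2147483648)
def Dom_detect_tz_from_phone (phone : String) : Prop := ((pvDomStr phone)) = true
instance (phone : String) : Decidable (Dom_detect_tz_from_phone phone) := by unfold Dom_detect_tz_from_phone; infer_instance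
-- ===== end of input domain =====

-- B replaces the three sliced-prefix dict lookups with a single longest-match fold over the
-- table's items, and the chained replace-normalization with one character-filter pass (alternative decomposition).

set_option maxRecDepth 40000

-- ===== PORT A =====
def PHONE_TZ_MAP : PySem.Dict String String := PySem.Dict.ofList [("91", "Asia/Kolkata"), ("92", "Asia/Karachi"), ("880", "Asia/Dhaka"), ("977", "Asia/Kathmandu"), ("94", "Asia/Colombo"), ("971", "Asia/Dubai"), ("966", "Asia/Riyadh"), ("968", "Asia/Muscat"), ("974", "Asia/Qatar"), ("965", "Asia/Kuwait"), ("973", "Asia/Bahrain"), ("65", "Asia/Singapore"), ("60", "Asia/Kuala_Lumpur"), ("66", "Asia/Bangkok"), ("62", "Asia/Jakarta"), ("63", "Asia/Manila"), ("84", "Asia/Ho_Chi_Minh"), ("86", "Asia/Shanghai"), ("81", "Asia/Tokyo"), ("82", "Asia/Seoul"), ("44", "Europe/London"), ("49", "Europe/Berlin"), ("33", "Europe/Paris"), ("7", "Europe/Moscow"), ("1", "America/New_York"), ("61", "Australia/Sydney"), ("64", "Pacific/Auckland"), ("27", "Africa/Johannesburg"), ("234", "Africa/Lagos"), ("254", "Africa/Nairobi"),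 ("20", "Africa/Cairo"), ("55", "America/Sao_Paulo"), ("52", "America/Mexico_City"), ("54", "America/Argentina/Buenos_Aires")]

-- phone.lstrip("+"): ported by hand (PySem has no lstrip-with-chars); exact: drops leading '+' characters
def pvLstripPlus (s : String) : String := String.ofList (s.toList.dropWhile (fun c => c == '+'))

-- the `for length in (3, 2, 1)` loop of A, with its early return
def tzTryLengths (digits : String) : List Int → Option String
  | [] => none
  | l :: rest =>
    match PHONE_TZ_MAP.get? (PySem.Str.slice digits none (some l)) with
    | some v => some v
    | none => tzTryLengths digits rest

def detect_tz_from_phone (phone : String) : Option String :=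
  if phone = "" then none
  else
    let digits := PySem.Str.replace (PySem.Str.replace (pvLstripPlus phone) " " "") "-" ""
    tzTryLengths digits [3, 2, 1]

-- ===== PORT B =====
-- B's normalization: one character pass — skip the leading '+' run, drop ' ' and '-'
def tzClean (phone : String) : String :=
  String.ofList ((phone.toList.dropWhile (fun c => c == '+')).filter (fun c => !(c == ' ') && !(c == '-')))

-- the body of B's `for key, tz in PHONE_TZ_MAP.items()` loop: keep the longest matching prefix
def tzBestStep (digits : String) (best : Option (String × String)) (kv : String × String) : Option (String × String) :=
  if PySem.Str.startswith digits kv.1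
      && (match best with
          | none => true
          | some b => decide (PySem.Str.len b.1 < PySem.Str.len kv.1))
  then some kv else best

def detect_tz_from_phone_alt (phone : String) : Option String :=
  if phone = "" then none
  else
    let digits := tzClean phone
    match PHONE_TZ_MAP.items.foldl (tzBestStep digits) none with
    | none => none
    | some b => some b.2

-- ===== PRECONDITION & SPEC =====
def Spec_detect_tz_from_phone (phone : String) (out : Option String) : Prop := out = detect_tz_from_phone_alt phone
instance (phone : String) (out : Option String) : Decidable (Spec_detect_tz_from_phone phone out) := by unfold Spec_detect_tz_from_phone; infer_instance

-- ===== CLAIM (what is proved, stated in full; the proofs are below) =====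
def Claim_equal_detect_tz_from_phone : Prop := ∀ (phone : String), Dom_detect_tz_from_phone phone → Spec_detect_tz_from_phone phone (detect_tz_from_phone phone)

-- ===== LEMMAS AND PROOFS =====

-- the map's items as a plain association list
def tzPairs : List (String × String) := [("91", "Asia/Kolkata"), ("92", "Asia/Karachi"), ("880", "Asia/Dhaka"), ("977", "Asia/Kathmandu"), ("94", "Asia/Colombo"), ("971", "Asia/Dubai"), ("966", "Asia/Riyadh"), ("968", "Asia/Muscat"), ("974", "Asia/Qatar"), ("965", "Asia/Kuwait"), ("973", "Asia/Bahrain"), ("65", "Asia/Singapore"), ("60", "Asia/Kuala_Lumpur"), ("66", "Asia/Bangkok"), ("62", "Asia/Jakarta"), ("63", "Asia/Manila"), ("84", "Asia/Ho_Chi_Minh"), ("86", "Asia/Shanghai"), ("81", "Asia/Tokyo"), ("82", "Asia/Seoul"), ("44", "Europe/London"), ("49", "Europe/Berlin"), ("33", "Europe/Paris"), ("7", "Europe/Moscow"), ("1", "America/New_York"), ("61", "Australia/Sydney"), ("64", "Pacific/Auckland"), ("27", "Africa/Johannesburg"), ("234", "Africa/Lagos"), ("254", "Africa/Nairobi"),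 ("20", "Africa/Cairo"), ("55", "America/Sao_Paulo"), ("52", "America/Mexico_City"), ("54", "America/Argentina/Buenos_Aires")]

-- "kv is a table entry whose key is a length-L prefix of d"
def tzQ (d : String) (L : Nat) (kv : String × String) : Bool :=
  PySem.Str.startswith d kv.1 && (kv.1.toList.length == L)

-- the common normal form both programs reduce to: the length-3 match, else 2, else 1
def tzChain (d : String) : Option (String × String) :=
  match tzPairs.find? (tzQ d 3) with
  | some b => some b
  | none =>
    match tzPairs.find? (tzQ d 2) with
    | some b => some b
    | none => tzPairs.find? (tzQ d 1)

def tzMeas : Option (String × String) → Nat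
  | none => 0
  | some b => b.1.toList.length

theorem map_items_eq : PHONE_TZ_MAP.items = tzPairs := by decide

theorem find?_congr_mem {α : Type} (p p' : α → Bool) (l : List α)
    (h : ∀ x ∈ l, p x = p' x) : l.find? p = l.find? p' := by
  induction l with
  | nil => rfl
  | cons x r ih =>
    rw [List.find?_cons, List.find?_cons, h x (List.mem_cons_self ..),
        ih (fun y hy => h y (List.mem_cons_of_mem _ hy))]

theorem get?_eq_find? (l : List (String × String)) (q : String) :
    (PySem.Dict.mk l).get? q = (l.find? (fun kv => kv.1 == q)).map (·.2) := by
  induction l with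
  | nil => rfl
  | cons kv r ih =>
    obtain ⟨k, v⟩ := kv
    rw [PySem.Dict.get?_mk_cons, List.find?_cons]
    by_cases hb : (k == q)
    · simp only [hb]
      rfl
    · simp only [hb]
      rw [if_neg (by simpa using hb), ih]

theorem map_get?_eq (q : String) :
    PHONE_TZ_MAP.get? q = (tzPairs.find? (fun kv => kv.1 == q)).map (·.2) := by
  have h : PHONE_TZ_MAP = PySem.Dict.mk tzPairs := by decide
  rw [h, get?_eq_find?]

-- replace(s, c, "") for a single character c is a character filter
theorem replace_go_single (c : Char) :
    ∀ (l : List Char) (fuel : Nat) (acc : List Char), l.length ≤ fuel →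
      PySem.Chars.replace.go [c] [] fuel l acc = acc.reverse ++ l.filter (fun x => !(x == c)) := by
  intro l
  induction l with
  | nil =>
    intro fuel acc _
    cases fuel <;> simp [PySem.Chars.replace.go]
  | cons x t ih =>
    intro fuel acc hf
    cases fuel with
    | zero => simp at hf
    | succ f =>
      rw [PySem.Chars.replace.go]
      by_cases hx : x = c
      · have hp : [c].isPrefixOf (x :: t) = true := by simp [hx, List.isPrefixOf]
        rw [if_pos hp]
        have := ih f acc (by simpa using Nat.le_of_succ_le_succ hf)
        simp only [List.length_cons] at hf
        simp [hx, this, List.filter]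
      · have hp : [c].isPrefixOf (x :: t) = false := by
          simp [List.isPrefixOf]
          exact fun h => hx h.symm
        rw [if_neg (by simp [hp])]
        have := ih f (x :: acc) (by simpa using Nat.le_of_succ_le_succ hf)
        rw [this]
        have hb : (x == c) = false := beq_eq_false_iff_ne.mpr hx
        simp [List.filter, hb]

theorem replace_single (c : Char) (l : List Char) :
    PySem.Chars.replace l [c] [] = l.filter (fun x => !(x == c)) := by
  rw [PySem.Chars.replace]
  simp only [List.isEmpty_cons, Bool.false_eq_true, if_false]
  exact replace_go_single c l l.length [] le_rfl

-- A's chained normalization equals B's single filter pass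
theorem digits_eq (phone : String) :
    PySem.Str.replace (PySem.Str.replace (pvLstripPlus phone) " " "") "-" "" = tzClean phone := by
  apply String.toList_injective
  rw [PySem.Str.toList_replace, PySem.Str.toList_replace]
  show PySem.Chars.replace (PySem.Chars.replace (pvLstripPlus phone).toList [' '] []) ['-'] []
      = (tzClean phone).toList
  rw [replace_single, replace_single]
  unfold pvLstripPlus tzClean
  rw [String.toList_ofList, String.toList_ofList, List.filter_filter]
  exact List.filter_congr (fun a _ => Bool.and_comm _ _)

-- key equality against a take-prefix, as startswith + exact length
theorem key_take_eq (d k : String) (L : Nat) :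
    (k == String.ofList (d.toList.take L)) =
      (PySem.Str.startswith d k && (k.toList.length == min L d.toList.length)) := by
  apply Bool.eq_iff_iff.mpr
  rw [Bool.and_eq_true, beq_iff_eq, beq_iff_eq, PySem.Str.startswith_eq,
      PySem.Chars.startswith_iff]
  constructor
  · intro h
    have ht : k.toList = d.toList.take L := by
      rw [h, String.toList_ofList]
    constructor
    · rw [ht]; exact List.take_prefix _ _
    · rw [ht, List.length_take]
  · rintro ⟨hpre, hlen⟩
    apply String.toList_injective
    rw [String.toList_ofList]
    have h1 : k.toList = d.toList.take k.toList.length := List.prefix_iff_eq_take.mp hpre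
    rw [h1, hlen, ← List.take_take, List.take_length]

theorem startswith_len_le (d k : String) (h : PySem.Str.startswith d k = true) :
    k.toList.length ≤ d.toList.length := by
  rw [PySem.Str.startswith_eq, PySem.Chars.startswith_iff] at h
  exact h.length_le

theorem slice_take (d : String) (k : Nat) :
    PySem.Str.slice d none (some (k : Int)) = String.ofList (d.toList.take k) := by
  apply String.toList_injective
  rw [PySem.Str.toList_slice, String.toList_ofList, PySem.Chars.slice_eq_listSlice,
      PySem.List.slice_to_natCast]

-- the lookup A does at slot L is the find? with predicate tzQ at min L |d|
theorem slot_eq (d : String) (L : Nat) :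
    PHONE_TZ_MAP.get? (PySem.Str.slice d none (some (L : Int)))
      = (tzPairs.find? (tzQ d (min L d.toList.length))).map (·.2) := by
  rw [slice_take, map_get?_eq]
  congr 1
  apply find?_congr_mem
  intro kv _
  rw [key_take_eq]
  rfl

theorem find?_none_of_gt (d : String) (L : Nat) (h : d.toList.length < L) :
    tzPairs.find? (tzQ d L) = none := by
  apply List.find?_eq_none.mpr
  intro kv _
  unfold tzQ
  intro hc
  rw [Bool.and_eq_true, beq_iff_eq] at hc
  have := startswith_len_le d kv.1 hc.1
  omega

-- A's loop over (3,2,1) computes the chain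
theorem tryLengths_eq_chain (d : String) :
    tzTryLengths d [3, 2, 1] = (tzChain d).map (·.2) := by
  have e3 := slot_eq d 3
  have e2 := slot_eq d 2
  have e1 := slot_eq d 1
  simp only [tzTryLengths, show ((3:Int) = ((3:Nat):Int)) from rfl,
    show ((2:Int) = ((2:Nat):Int)) from rfl, show ((1:Int) = ((1:Nat):Int)) from rfl,
    e3, e2, e1]
  unfold tzChain
  by_cases h3 : 3 ≤ d.toList.length
  · rw [Nat.min_eq_left h3, Nat.min_eq_left (by omega), Nat.min_eq_left (by omega)]
    cases tzPairs.find? (tzQ d 3) <;> cases tzPairs.find? (tzQ d 2) <;>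
      cases tzPairs.find? (tzQ d 1) <;> rfl
  · have n3 : tzPairs.find? (tzQ d 3) = none := find?_none_of_gt d 3 (by omega)
    by_cases h2 : d.toList.length = 2
    · rw [show min 3 d.toList.length = 2 by omega, show min 2 d.toList.length = 2 by omega,
          show min 1 d.toList.length = 1 by omega, n3]
      cases tzPairs.find? (tzQ d 2) <;> cases tzPairs.find? (tzQ d 1) <;> rfl
    · have n2 : tzPairs.find? (tzQ d 2) = none := find?_none_of_gt d 2 (by omega)
      by_cases h1 : d.toList.length = 1
      · rw [show min 3 d.toList.length = 1 by omega, show min 2 d.toList.length = 1 by omega,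
            show min 1 d.toList.length = 1 by omega, n3, n2]
        cases tzPairs.find? (tzQ d 1) <;> rfl
      · have h0 : d.toList.length = 0 := by omega
        have n1 : tzPairs.find? (tzQ d 1) = none := find?_none_of_gt d 1 (by omega)
        have n0 : tzPairs.find? (tzQ d 0) = none := by
          apply List.find?_eq_none.mpr
          intro kv hkv
          unfold tzQ
          intro hc
          rw [Bool.and_eq_true, beq_iff_eq] at hc
          have hlen : 1 ≤ kv.1.toList.length := by
            revert hkv
            have : ∀ kv ∈ tzPairs, 1 ≤ kv.1.toList.length := by decide
            exact this kv
          omega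
        rw [show min 3 d.toList.length = 0 by omega, show min 2 d.toList.length = 0 by omega,
            show min 1 d.toList.length = 0 by omega, n3, n2, n1, n0]
        rfl

-- B's step, normalized to the Nat measure
theorem step_norm (d : String) (acc : Option (String × String)) (kv : String × String)
    (h1 : 1 ≤ kv.1.toList.length) :
    tzBestStep d acc kv =
      if PySem.Str.startswith d kv.1 && decide (tzMeas acc < kv.1.toList.length)
      then some kv else acc := by
  unfold tzBestStep
  cases acc with
  | none =>
    have hd : decide (tzMeas none < kv.1.toList.length) = true :=
      decide_eq_true (show tzMeas none < kv.1.toList.length from by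
        show 0 < kv.1.toList.length; omega)
    simp only [hd]
  | some b =>
    have hd : decide (PySem.Str.len b.1 < PySem.Str.len kv.1)
        = decide (tzMeas (some b) < kv.1.toList.length) := by
      simp [PySem.Str.len_eq, tzMeas]
    simp only [hd]

-- the longest-match fold, characterized by the three find?s
theorem fold_formula (d : String) :
    ∀ (l : List (String × String)) (acc : Option (String × String)),
      (∀ kv ∈ l, kv.1.toList.length = 1 ∨ kv.1.toList.length = 2 ∨ kv.1.toList.length = 3) →
      l.foldl (tzBestStep d) acc =
        (if 3 ≤ tzMeas acc then acc else
         match l.find? (tzQ d 3) with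
         | some b => some b
         | none =>
           if 2 ≤ tzMeas acc then acc else
           match l.find? (tzQ d 2) with
           | some b => some b
           | none =>
             if 1 ≤ tzMeas acc then acc else
             match l.find? (tzQ d 1) with
             | some b => some b
             | none => acc) := by
  intro l
  induction l with
  | nil =>
    intro acc _
    simp only [List.foldl_nil, List.find?_nil]
    split_ifs <;> rfl
  | cons kv rest ih =>
    intro acc hl
    have hkv := hl kv (List.mem_cons_self ..)
    have hrest := fun x hx => hl x (List.mem_cons_of_mem _ hx)
    rw [List.foldl_cons, step_norm d acc kv (by omega), ih _ hrest]
    by_cases hs : PySem.Str.startswith d kv.1 = true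
    · rcases hkv with hL | hL | hL
      · -- length 1
        have nf3 : ¬ tzQ d 3 kv = true := by unfold tzQ; rw [hL]; simp
        have nf2 : ¬ tzQ d 2 kv = true := by unfold tzQ; rw [hL]; simp
        have hq1 : tzQ d 1 kv = true := by unfold tzQ; rw [hs, hL]; rfl
        rw [List.find?_cons_of_neg nf3, List.find?_cons_of_neg nf2,
            List.find?_cons_of_pos hq1]
        by_cases hm3 : 3 ≤ tzMeas acc
        · have ha : (if (PySem.Str.startswith d kv.1 && decide (tzMeas acc < kv.1.toList.length)) = true then some kv else acc) = acc := by
            apply if_neg; rw [hL]; simp; omega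
          rw [ha, if_pos hm3, if_pos hm3]
        · by_cases hm2 : 2 ≤ tzMeas acc
          · have ha : (if (PySem.Str.startswith d kv.1 && decide (tzMeas acc < kv.1.toList.length)) = true then some kv else acc) = acc := by
              apply if_neg; rw [hL]; simp; omega
            rw [ha, if_neg hm3, if_neg hm3]
            cases rest.find? (tzQ d 3)
            · rw [if_pos hm2, if_pos hm2]
            · rfl
          · by_cases hm1 : 1 ≤ tzMeas acc
            · have ha : (if (PySem.Str.startswith d kv.1 && decide (tzMeas acc < kv.1.toList.length)) = true then some kv else acc) = acc := by
                apply if_neg; rw [hL]; simp; omega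
              rw [ha, if_neg hm3, if_neg hm3]
              cases rest.find? (tzQ d 3)
              · rw [if_neg hm2, if_neg hm2]
                cases rest.find? (tzQ d 2)
                · rw [if_pos hm1, if_pos hm1]
                · rfl
              · rfl
            · have ha : (if (PySem.Str.startswith d kv.1 && decide (tzMeas acc < kv.1.toList.length)) = true then some kv else acc) = some kv := by
                apply if_pos; rw [hs, hL]; simp; omega
              have hm' : tzMeas (some kv) = 1 := by simp [tzMeas, hL]
              rw [ha, if_neg (show ¬ 3 ≤ tzMeas (some kv) by omega), if_neg hm3]
              cases rest.find? (tzQ d 3)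
              · rw [if_neg (show ¬ 2 ≤ tzMeas (some kv) by omega), if_neg hm2]
                cases rest.find? (tzQ d 2)
                · rw [if_pos (show 1 ≤ tzMeas (some kv) by omega), if_neg hm1]
                · rfl
              · rfl
      · -- length 2
        have nf3 : ¬ tzQ d 3 kv = true := by unfold tzQ; rw [hL]; simp
        have hq2 : tzQ d 2 kv = true := by unfold tzQ; rw [hs, hL]; rfl
        rw [List.find?_cons_of_neg nf3, List.find?_cons_of_pos hq2]
        by_cases hm3 : 3 ≤ tzMeas acc
        · have ha : (if (PySem.Str.startswith d kv.1 && decide (tzMeas acc < kv.1.toList.length)) = true then some kv else acc) = acc := by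
            apply if_neg; rw [hL]; simp; omega
          rw [ha, if_pos hm3, if_pos hm3]
        · by_cases hm2 : 2 ≤ tzMeas acc
          · have ha : (if (PySem.Str.startswith d kv.1 && decide (tzMeas acc < kv.1.toList.length)) = true then some kv else acc) = acc := by
              apply if_neg; rw [hL]; simp; omega
            rw [ha, if_neg hm3, if_neg hm3]
            cases rest.find? (tzQ d 3)
            · rw [if_pos hm2, if_pos hm2]
            · rfl
          · have ha : (if (PySem.Str.startswith d kv.1 && decide (tzMeas acc < kv.1.toList.length)) = true then some kv else acc) = some kv := by
              apply if_pos; rw [hs, hL]; simp; omega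
            have hm' : tzMeas (some kv) = 2 := by simp [tzMeas, hL]
            rw [ha, if_neg (show ¬ 3 ≤ tzMeas (some kv) by omega), if_neg hm3]
            cases rest.find? (tzQ d 3)
            · rw [if_pos (show 2 ≤ tzMeas (some kv) by omega), if_neg hm2]
            · rfl
      · -- length 3
        have hq3 : tzQ d 3 kv = true := by unfold tzQ; rw [hs, hL]; rfl
        rw [List.find?_cons_of_pos hq3]
        by_cases hm3 : 3 ≤ tzMeas acc
        · have ha : (if (PySem.Str.startswith d kv.1 && decide (tzMeas acc < kv.1.toList.length)) = true then some kv else acc) = acc := by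
            apply if_neg; rw [hL]; simp; omega
          rw [ha, if_pos hm3, if_pos hm3]
        · have ha : (if (PySem.Str.startswith d kv.1 && decide (tzMeas acc < kv.1.toList.length)) = true then some kv else acc) = some kv := by
            apply if_pos; rw [hs, hL]; simp; omega
          have hm' : tzMeas (some kv) = 3 := by simp [tzMeas, hL]
          rw [ha, if_pos (show 3 ≤ tzMeas (some kv) by omega), if_neg hm3]
    · have hs' : PySem.Str.startswith d kv.1 = false := by
        cases h : PySem.Str.startswith d kv.1
        · rfl
        · exact absurd h hs
      have ha : (if (PySem.Str.startswith d kv.1 && decide (tzMeas acc < kv.1.toList.length)) = true then some kv else acc) = acc := by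
        apply if_neg; rw [hs']; simp
      have nf3 : ¬ tzQ d 3 kv = true := by unfold tzQ; rw [hs']; simp
      have nf2 : ¬ tzQ d 2 kv = true := by unfold tzQ; rw [hs']; simp
      have nf1 : ¬ tzQ d 1 kv = true := by unfold tzQ; rw [hs']; simp
      rw [ha, List.find?_cons_of_neg nf3, List.find?_cons_of_neg nf2,
          List.find?_cons_of_neg nf1]

theorem fold_eq_chain (d : String) :
    tzPairs.foldl (tzBestStep d) none = tzChain d := by
  rw [fold_formula d tzPairs none (by decide)]
  unfold tzChain
  simp only [tzMeas]
  cases tzPairs.find? (tzQ d 3)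
  · cases tzPairs.find? (tzQ d 2)
    · cases tzPairs.find? (tzQ d 1) <;> rfl
    · rfl
  · rfl

-- ===== VERDICT (by name: the statement is the Claim_ definition above) =====
theorem detect_tz_from_phone_spec : Claim_equal_detect_tz_from_phone := by
  intro phone _
  unfold Spec_detect_tz_from_phone detect_tz_from_phone detect_tz_from_phone_alt
  by_cases h : phone = ""
  · rw [if_pos h, if_pos h]
  · rw [if_neg h, if_neg h]
    simp only [digits_eq phone, map_items_eq, fold_eq_chain]
    rw [tryLengths_eq_chain]
    cases tzChain (tzClean phone) <;> rfl
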